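-- pv_equiv track=rewrite | github.com/An-20/advent-of-code-2023 | day13/p1.py | get_reflection_idx
-- ===== SOURCE A (Python) =====
-- from typing import List, Optional
--
-- def get_reflection_idx(p: List[str]) -> Optional[int]:
--     for split_idx in range(len(p) - 1):
--         matching = 0
--         offset = 0
--         while True:
--             if not (0 <= split_idx - offset and split_idx + offset + 1 < len(p)):
--                 break
--             if p[split_idx - offset] == p[split_idx + offset + 1]:
--                 matching += 1
--             offset += 1
--         if matching == offset:
--             return split_idx + 1
--     return None
-- ===== SOURCE B (Python) =====
-- from typing import List, Optional
--
-- def get_reflection_idx(p: List[str]) -> Optional[int]: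
--     # Intern rows to small ints once, then test mirror splits by slice comparison on the ids.
--     ids_map = {}
--     ids = []
--     for row in p:
--         if row not in ids_map:
--             ids_map[row] = len(ids_map)
--         ids.append(ids_map[row])
--     n = len(p)
--     for i in range(1, n):
--         k = min(i, n - i)
--         if ids[i - k:i] == ids[i:i + k][::-1]:
--             return i
--     return None
-- ===== Notes on version B (the rewrite author's own statement) =====
-- stated objective: alternative
-- what changed: B first interns each row to a small integer id via a dict built in one pass, then finds the mirror split by comparing a reversed id-slice to a prefix id-slice, instead of A's per-split inner while-loop that counts matching string pairs and compares the count to the offset.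
import Mathlib
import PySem

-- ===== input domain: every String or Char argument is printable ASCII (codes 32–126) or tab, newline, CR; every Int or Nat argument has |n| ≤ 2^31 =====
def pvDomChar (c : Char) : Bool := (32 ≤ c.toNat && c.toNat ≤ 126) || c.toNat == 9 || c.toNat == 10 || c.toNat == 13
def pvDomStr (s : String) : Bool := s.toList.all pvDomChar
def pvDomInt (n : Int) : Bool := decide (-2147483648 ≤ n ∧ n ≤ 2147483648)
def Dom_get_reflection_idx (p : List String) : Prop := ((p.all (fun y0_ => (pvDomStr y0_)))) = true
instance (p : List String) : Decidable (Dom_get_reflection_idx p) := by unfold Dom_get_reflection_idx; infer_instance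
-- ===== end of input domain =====

-- B interns rows to small ints once and tests mirror splits by id-slice comparison,
-- replacing A's per-split string-comparing inner loop; objective: alternative.

-- ===== PORT A =====
-- inner 'while True' loop of A: state (matching, offset), returns the final pair
def aInner (p : List String) (split : Int) (offset matching : Int) : Int × Int :=
  if h : 0 ≤ split - offset ∧ split + offset + 1 < (p.length : Int) then
    let matching' :=
      if PySem.List.pyGet? p (split - offset) = PySem.List.pyGet? p (split + offset + 1)
      then matching + 1 else matching
    aInner p split (offset + 1) matching'
  else (matching, offset)
termination_by ((p.length : Int) - (split + offset)).toNat
decreasing_by omega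

-- outer 'for split_idx in range(len(p)-1)' loop with early return
def aLoop (p : List String) : List Int → Option Int
  | [] => none
  | s :: rest =>
      let r := aInner p s 0 0
      if r.1 = r.2 then some (s + 1) else aLoop p rest

def get_reflection_idx (p : List String) : Option Int :=
  aLoop p (PySem.List.pyRange 0 ((p.length : Int) - 1) 1)

-- ===== PORT B =====
-- one step of the interning loop: state (ids_map, ids)
def bStep (st : PySem.Dict String Int × List Int) (row : String) :
    PySem.Dict String Int × List Int :=
  let d := if st.1.contains row then st.1 else st.1.insert row (st.1.size : Int)
  (d, st.2 ++ [d.getD row 0])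

-- 'for i in range(1, n)' loop with early return
def bLoop (ids : List Int) (n : Int) : List Int → Option Int
  | [] => none
  | i :: rest =>
      let k := min i (n - i)
      if PySem.List.slice ids (some (i - k)) (some i)
          = (PySem.List.slice ids (some i) (some (i + k))).reverse
      then some i else bLoop ids n rest

def get_reflection_idx_alt (p : List String) : Option Int :=
  let ids := (p.foldl bStep (PySem.Dict.empty, [])).2
  let n : Int := p.length
  bLoop ids n (PySem.List.pyRange 1 n 1)

-- ===== PRECONDITION & SPEC =====
def Spec_get_reflection_idx (p : List String) (out : Option Int) : Prop := out = get_reflection_idx_alt p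
instance (p : List String) (out : Option Int) : Decidable (Spec_get_reflection_idx p out) := by unfold Spec_get_reflection_idx; infer_instance

-- ===== CLAIM (what is proved, stated in full; the proofs are below) =====
def Claim_equal_get_reflection_idx : Prop := ∀ (p : List String), Dom_get_reflection_idx p → Spec_get_reflection_idx p (get_reflection_idx p)

-- ===== LEMMAS AND PROOFS =====
lemma aInner_char (p : List String) (s : Int) : ∀ (offset matching : Int), matching ≤ offset →
    ((aInner p s offset matching).1 = (aInner p s offset matching).2 ↔
     (matching = offset ∧ ∀ j : Int, offset ≤ j → 0 ≤ s - j → s + j + 1 < (p.length : Int) →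
        PySem.List.pyGet? p (s - j) = PySem.List.pyGet? p (s + j + 1))) := by
  intro offset matching
  fun_induction aInner p s offset matching with
  | case1 off m hcond mlet ih =>
    intro hm
    by_cases hcmp : PySem.List.pyGet? p (s - off) = PySem.List.pyGet? p (s + off + 1)
    · simp only [mlet, dif_pos hcmp] at ih ⊢
      rw [ih (by omega)]
      constructor
      · rintro ⟨h1, h2⟩
        refine ⟨by omega, fun j hj h0 hl => ?_⟩
        rcases eq_or_lt_of_le hj with rfl | hlt
        · exact hcmp
        · exact h2 j (by omega) h0 hl
      · rintro ⟨h1, h2⟩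
        exact ⟨by omega, fun j hj h0 hl => h2 j (by omega) h0 hl⟩
    · simp only [mlet, dif_neg hcmp] at ih ⊢
      rw [ih (by omega)]
      constructor
      · rintro ⟨h1, _⟩; omega
      · rintro ⟨h1, h2⟩
        exact absurd (h2 off (le_refl _) hcond.1 hcond.2) hcmp
  | case2 off m hcond =>
    intro hm
    constructor
    · intro h
      refine ⟨h, fun j hj h0 hl => absurd ?_ hcond⟩
      constructor <;> omega
    · rintro ⟨h1, _⟩; exact h1

def BuildInv (p0 : List String) (d : PySem.Dict String Int) (ids : List Int) : Prop :=
  ids.length = p0.length ∧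
  d.keys.Nodup ∧
  (∀ k v, d.get? k = some v → 0 ≤ v ∧ v < (d.size : Int)) ∧
  (∀ k1 k2 v, d.get? k1 = some v → d.get? k2 = some v → k1 = k2) ∧
  (∀ (j : Nat) (hj : j < p0.length), d.get? (p0[j]) = ids[j]?)

lemma buildInv_step (p0 : List String) (d : PySem.Dict String Int) (ids : List Int) (row : String)
    (h : BuildInv p0 d ids) :
    BuildInv (p0 ++ [row]) (bStep (d, ids) row).1 (bStep (d, ids) row).2 := by
  obtain ⟨hlen, hnd, hbd, hinj, hget⟩ := h
  by_cases hc : d.contains row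
  · refine ⟨by simp [bStep, hc, hlen], by simp [bStep, hc, hnd], ?_, ?_, ?_⟩
    · simpa [bStep, hc] using hbd
    · simpa [bStep, hc] using hinj
    · intro j hj
      simp only [bStep, hc, if_pos]
      rcases Nat.lt_or_ge j p0.length with hlt | hge
      · rw [List.getElem_append_left hlt, List.getElem?_append_left (by omega)]
        exact hget j hlt
      · have hj' : j = p0.length := by simp at hj; omega
        subst hj'
        rw [List.getElem_append_right (le_refl _)]
        simp only [Nat.sub_self, List.getElem_singleton]
        rw [← hlen, List.getElem?_concat_length]
        have hs : (d.get? row).isSome := by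
          rw [← PySem.Dict.contains_eq_isSome_get?]; exact hc
        rw [PySem.Dict.getD_eq_get?_getD]
        obtain ⟨v, hv⟩ := Option.isSome_iff_exists.mp hs
        simp [hv]
  · have hc' : d.contains row = false := by simpa using hc
    have hrow_new : d.get? row = none := by
      rw [PySem.Dict.get?_eq_none_iff_contains]; exact hc'
    have hsize : ((d.insert row (d.size : Int)).size : Int) = (d.size : Int) + 1 := by
      rw [PySem.Dict.size_insert]; simp [hc']
    refine ⟨by simp [bStep, hc', hlen], ?_, ?_, ?_, ?_⟩
    · simp only [bStep, hc', Bool.false_eq_true, if_neg, not_false_iff]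
      exact PySem.Dict.nodup_keys_insert _ _ _ hnd
    · simp only [bStep, hc', Bool.false_eq_true, if_neg, not_false_iff]
      intro k v hv
      rw [PySem.Dict.get?_insert] at hv
      rw [hsize]
      split_ifs at hv with hk
      · have hveq := Option.some.inj hv; constructor <;> omega
      · have := hbd k v hv; omega
    · simp only [bStep, hc', Bool.false_eq_true, if_neg, not_false_iff]
      intro k1 k2 v h1 h2
      rw [PySem.Dict.get?_insert] at h1 h2
      split_ifs at h1 h2 with hk1 hk2 hk2
      · rw [hk1, hk2]
      · have hv1 := Option.some.inj h1; have := hbd k2 v h2; exfalso; omega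
      · have hv2 := Option.some.inj h2; have := hbd k1 v h1; exfalso; omega
      · exact hinj k1 k2 v h1 h2
    · simp only [bStep, hc', Bool.false_eq_true, if_neg, not_false_iff]
      intro j hj
      rcases Nat.lt_or_ge j p0.length with hlt | hge
      · rw [List.getElem_append_left hlt, List.getElem?_append_left (by omega)]
        have hne : p0[j]'hlt ≠ row := by
          intro he
          have := hget j hlt
          rw [he, hrow_new] at this
          have : ids[j]? = none := this.symm
          rw [List.getElem?_eq_none_iff] at this
          omega
        rw [PySem.Dict.get?_insert_of_ne _ _ hne]
        exact hget j hlt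
      · have hj' : j = p0.length := by simp at hj; omega
        subst hj'
        rw [List.getElem_append_right (le_refl _)]
        simp only [Nat.sub_self, List.getElem_singleton]
        rw [← hlen, List.getElem?_concat_length]
        rw [PySem.Dict.get?_insert_self]
        congr 1
        rw [PySem.Dict.getD_insert_self]
lemma buildInv_fold : ∀ (rest p0 : List String) (d : PySem.Dict String Int) (ids : List Int),
    BuildInv p0 d ids →
    BuildInv (p0 ++ rest) (rest.foldl bStep (d, ids)).1 (rest.foldl bStep (d, ids)).2
  | [], p0, d, ids, h => by simpa using h
  | row :: rest, p0, d, ids, h => by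
    have hstep := buildInv_step p0 d ids row h
    have := buildInv_fold rest (p0 ++ [row]) (bStep (d, ids) row).1 (bStep (d, ids) row).2 hstep
    simpa [List.append_assoc] using this

lemma buildInv_p (p : List String) :
    BuildInv p (p.foldl bStep (PySem.Dict.empty, [])).1 (p.foldl bStep (PySem.Dict.empty, [])).2 := by
  have h0 : BuildInv [] (PySem.Dict.empty : PySem.Dict String Int) [] := by
    refine ⟨rfl, PySem.Dict.nodup_keys_empty, ?_, ?_, ?_⟩
    · intro k v hv; rw [PySem.Dict.get?_empty] at hv; cases hv
    · intro k1 k2 v h1 h2; rw [PySem.Dict.get?_empty] at h1; cases h1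
    · intro j hj; cases hj
  simpa using buildInv_fold p [] _ _ h0

lemma ids_eq_iff (p : List String) (a b : Nat) (ha : a < p.length) (hb : b < p.length) :
    ((p.foldl bStep (PySem.Dict.empty, [])).2[a]? = (p.foldl bStep (PySem.Dict.empty, [])).2[b]?)
      ↔ (p[a]? = p[b]?) := by
  obtain ⟨hlen, _, _, hinj, hget⟩ := buildInv_p p
  set ids := (p.foldl bStep (PySem.Dict.empty, [])).2 with hids
  constructor
  · intro h
    have h1 := hget a ha
    have h2 := hget b hb
    obtain ⟨v, hv⟩ : ∃ v, ids[a]? = some v :=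
      ⟨ids[a]'(by omega), List.getElem?_eq_getElem (by omega)⟩
    rw [hv] at h1 h
    rw [← h] at h2
    have := hinj _ _ v h1 h2
    rw [List.getElem?_eq_getElem ha, List.getElem?_eq_getElem hb, this]
  · intro h
    have hab : p[a]'ha = p[b]'hb := by
      rw [List.getElem?_eq_getElem ha, List.getElem?_eq_getElem hb] at h
      exact Option.some.inj h
    rw [← hget a ha, ← hget b hb, hab]
lemma slice_palindrome_iff (l : List Int) (i k : Nat) (hk : k ≤ i) (hik : i + k ≤ l.length) :
    (PySem.List.slice l (some ((i : Int) - (k : Int))) (some (i : Int))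
      = (PySem.List.slice l (some (i : Int)) (some ((i : Int) + (k : Int)))).reverse)
      ↔ ∀ j : Nat, j < k → l[i - k + j]? = l[i + k - 1 - j]? := by
  have hcast : (i : Int) - (k : Int) = ((i - k : Nat) : Int) := by omega
  rw [hcast, PySem.List.slice_natCast, ← Nat.cast_add, PySem.List.slice_natCast]
  have hik' : i - (i - k) = k := by omega
  have hik2 : i + k - i = k := by omega
  rw [hik', hik2]
  have hL : ((l.drop (i - k)).take k).length = k := by
    simp [List.length_take, List.length_drop]; omega
  have hR : ((l.drop i).take k).length = k := by
    simp [List.length_take, List.length_drop]; omega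
  have hlhs : ∀ j, j < k → ((l.drop (i - k)).take k)[j]? = l[i - k + j]? := by
    intro j hj
    rw [List.getElem?_take_of_lt hj, List.getElem?_drop]
  have hrhs : ∀ j, j < k → (((l.drop i).take k).reverse)[j]? = l[i + k - 1 - j]? := by
    intro j hj
    rw [List.getElem?_reverse (by rw [hR]; exact hj), hR,
        List.getElem?_take_of_lt (by omega : k - 1 - j < k), List.getElem?_drop]
    congr 1
    omega
  constructor
  · intro h j hj
    rw [← hlhs j hj, ← hrhs j hj, h]
  · intro h
    apply List.ext_getElem?
    intro j
    rcases Nat.lt_or_ge j k with hj | hj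
    · rw [hlhs j hj, hrhs j hj]; exact h j hj
    · rw [List.getElem?_eq_none (by rw [hL]; exact hj),
          List.getElem?_eq_none (by rw [List.length_reverse, hR]; exact hj)]
lemma acc_iff (p : List String) (t : Nat) (ht : t + 1 < p.length) :
    ((aInner p (0 + (t : Int)) 0 0).1 = (aInner p (0 + (t : Int)) 0 0).2) ↔
    (PySem.List.slice (p.foldl bStep (PySem.Dict.empty, [])).2
        (some ((1 + (t : Int)) - min (1 + (t : Int)) ((p.length : Int) - (1 + (t : Int)))))
        (some (1 + (t : Int)))
      = (PySem.List.slice (p.foldl bStep (PySem.Dict.empty, [])).2 (some (1 + (t : Int)))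
          (some ((1 + (t : Int)) + min (1 + (t : Int)) ((p.length : Int) - (1 + (t : Int)))))).reverse) := by
  set ids := (p.foldl bStep (PySem.Dict.empty, [])).2 with hids
  have hlen : ids.length = p.length := (buildInv_p p).1
  set n := p.length with hn
  set K : Nat := min (t + 1) (n - (t + 1)) with hK
  have hmin : min (1 + (t : Int)) ((n : Int) - (1 + (t : Int))) = (K : Int) := by
    rw [hK]; omega
  have hone : (1 + (t : Int)) = ((t + 1 : Nat) : Int) := by push_cast; ring
  rw [hmin, hone]
  rw [slice_palindrome_iff ids (t + 1) K (by omega) (by omega)]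
  -- B side in p-terms
  have hBp : (∀ j : Nat, j < K → ids[t + 1 - K + j]? = ids[t + 1 + K - 1 - j]?) ↔
      (∀ j : Nat, j < K → p[t + 1 - K + j]? = p[t + 1 + K - 1 - j]?) := by
    refine forall_congr' fun j => imp_congr_right fun hj => ?_
    exact ids_eq_iff p _ _ (by omega) (by omega)
  -- A side characterization
  rw [aInner_char p (0 + (t : Int)) 0 0 le_rfl]
  have hA : ((0 : Int) = 0 ∧ ∀ j : Int, 0 ≤ j → 0 ≤ (0 + (t : Int)) - j →
      (0 + (t : Int)) + j + 1 < (p.length : Int) →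
      PySem.List.pyGet? p ((0 + (t : Int)) - j) = PySem.List.pyGet? p ((0 + (t : Int)) + j + 1)) ↔
      (∀ jn : Nat, jn < K → p[t - jn]? = p[t + jn + 1]?) := by
    constructor
    · rintro ⟨-, h⟩ jn hjn
      have h1 : (0 + (t : Int)) - (jn : Int) = ((t - jn : Nat) : Int) := by omega
      have h2 : (0 + (t : Int)) + (jn : Int) + 1 = ((t + jn + 1 : Nat) : Int) := by omega
      have := h (jn : Int) (by omega) (by omega) (by omega)
      rwa [h1, h2, PySem.List.pyGet?_natCast, PySem.List.pyGet?_natCast] at this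
    · intro h
      refine ⟨rfl, fun j hj0 hjt hjn => ?_⟩
      obtain ⟨jn, rfl⟩ : ∃ jn : Nat, j = (jn : Int) := ⟨j.toNat, by omega⟩
      have h1 : (0 + (t : Int)) - (jn : Int) = ((t - jn : Nat) : Int) := by omega
      have h2 : (0 + (t : Int)) + (jn : Int) + 1 = ((t + jn + 1 : Nat) : Int) := by omega
      rw [h1, h2, PySem.List.pyGet?_natCast, PySem.List.pyGet?_natCast]
      exact h jn (by omega)
  rw [hA, hBp]
  -- reindex j ↦ K - 1 - j
  constructor
  · intro h j hj
    have := h (K - 1 - j) (by omega)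
    have e1 : t - (K - 1 - j) = t + 1 - K + j := by omega
    have e2 : t + (K - 1 - j) + 1 = t + 1 + K - 1 - j := by omega
    rwa [e1, e2] at this
  · intro h jn hjn
    have := h (K - 1 - jn) (by omega)
    have e1 : t + 1 - K + (K - 1 - jn) = t - jn := by omega
    have e2 : t + 1 + K - 1 - (K - 1 - jn) = t + jn + 1 := by omega
    rwa [e1, e2] at this

lemma loops_eq (p : List String) : ∀ l : List Nat, (∀ t ∈ l, t + 1 < p.length) →
    aLoop p (l.map (fun t : Nat => (0 : Int) + (t : Int)))
      = bLoop (p.foldl bStep (PySem.Dict.empty, [])).2 ((p.length : Int)) (l.map (fun t : Nat => (1 : Int) + (t : Int)))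
  | [], _ => rfl
  | t :: l, h => by
    have ht : t + 1 < p.length := h t (by simp)
    have hiff := acc_iff p t ht
    have hrest := loops_eq p l (fun u hu => h u (by simp [hu]))
    simp only [List.map_cons]
    rw [aLoop, bLoop]
    by_cases hA : (aInner p (0 + (t : Int)) 0 0).1 = (aInner p (0 + (t : Int)) 0 0).2
    · rw [if_pos hA, if_pos (hiff.mp hA)]
      congr 1
      ring
    · rw [if_neg hA, if_neg (fun hB => hA (hiff.mpr hB))]
      exact hrest

-- ===== VERDICT (by name: the statement is the Claim_ definition above) =====
theorem get_reflection_idx_spec : Claim_equal_get_reflection_idx := by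
  unfold Claim_equal_get_reflection_idx
  intro p _
  unfold Spec_get_reflection_idx
  unfold get_reflection_idx get_reflection_idx_alt
  show aLoop p (PySem.List.pyRange 0 ((p.length : Int) - 1) 1)
      = bLoop (p.foldl bStep (PySem.Dict.empty, [])).2 ((p.length : Int))
          (PySem.List.pyRange 1 ((p.length : Int)) 1)
  rw [PySem.List.pyRange_one 0 ((p.length : Int) - 1), PySem.List.pyRange_one 1 ((p.length : Int))]
  have he : ((p.length : Int) - 1 - 0).toNat = ((p.length : Int) - 1).toNat := by omega
  rw [he]
  exact loops_eq p (List.range ((p.length : Int) - 1).toNat)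
    (fun t htm => by
      have := List.mem_range.mp htm
      omega)
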